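-- pv_equiv track=rewrite | github.com/DRMF/DRMF-Seeding-Project | Azeem/tex2Wiki.py | modLabel
-- ===== SOURCE A (Python) =====
-- def isnumber(char):
--     return char[0] in "0123456789"
--
-- def modLabel(label):
--     # label.replace("Formula:KLS:","KLS;")
--     isNumer = False
--     newlabel = ""
--     num = ""
--     for i in range(0, len(label)):
--         if isNumer and not isnumber(label[i]):
--             if len(num) > 1:
--                 newlabel += num
--                 isNumer = False
--                 num = ""
--             else:
--                 newlabel += "0" + str(num)
--                 num = ""
--                 isNumer = False
--         if isnumber(label[i]):
--             isNumer = True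
--             num += str(label[i])
--         else:
--             isNumer = False
--             newlabel += label[i]
--     if len(num) > 1:
--         newlabel += num
--     elif len(num) == 1:
--         newlabel += "0" + num
--     return (newlabel)
-- ===== SOURCE B (Python) =====
-- def modLabel(label):
--     # Run-based rewrite: consume each maximal digit run at once and pad it
--     # with zfill(2); no per-character state flag is maintained.
--     out = []
--     i, n = 0, len(label)
--     while i < n:
--         if '0' <= label[i] <= '9':
--             j = i
--             while j < n and '0' <= label[j] <= '9':
--                 j += 1
--             out.append(label[i:j].zfill(2))
--             i = j
--         else:
--             out.append(label[i])
--             i += 1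
--     return "".join(out)
-- ===== Notes on version B (the rewrite author's own statement) =====
-- stated objective: alternative
-- what changed: Replaced the per-character state machine (isNumer flag plus pending-run accumulator with duplicated flush logic) by a run-based scanner that consumes each maximal digit run at once and pads it with zfill(2).
import Mathlib
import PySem

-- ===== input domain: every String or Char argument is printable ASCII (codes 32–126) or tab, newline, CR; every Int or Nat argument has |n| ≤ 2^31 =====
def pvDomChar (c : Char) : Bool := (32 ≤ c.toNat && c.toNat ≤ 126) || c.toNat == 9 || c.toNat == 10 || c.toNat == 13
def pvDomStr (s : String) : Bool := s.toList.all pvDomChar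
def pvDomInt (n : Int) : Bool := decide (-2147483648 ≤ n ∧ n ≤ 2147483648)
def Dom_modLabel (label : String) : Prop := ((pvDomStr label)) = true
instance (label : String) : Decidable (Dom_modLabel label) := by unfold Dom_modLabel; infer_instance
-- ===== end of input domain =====

-- B replaces A's per-character digit-run state machine by a run-at-a-time scanner (zfill(2) per maximal digit run); same cost, plainer control flow.

-- ===== PORT A =====
-- isnumber(char): char[0] in "0123456789" (applied to single chars here)
def pvIsnumber (c : Char) : Bool := ("0123456789".toList).contains c

-- the for-loop of A, state = (isNumer, newlabel, num), iterating over the remaining chars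
def pvALoop : Bool → List Char → List Char → List Char → List Char
  | _, acc, num, [] =>
      -- the trailing flush after the loop
      if num.length > 1 then acc ++ num
      else if num.length = 1 then acc ++ '0' :: num
      else acc
  | isN, acc, num, c :: cs =>
      -- first if: flush the pending run when a non-digit follows it
      let st :=
        if isN && !(pvIsnumber c) then
          ((if num.length > 1 then acc ++ num else acc ++ '0' :: num), ([] : List Char))
        else (acc, num)
      -- second if/else: extend the run or copy the character
      if pvIsnumber c then pvALoop true st.1 (st.2 ++ [c]) cs
      else pvALoop false (st.1 ++ [c]) st.2 cs

def modLabel (label : String) : String := String.ofList (pvALoop false [] [] label.toList)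

-- ===== PORT B =====
-- '0' <= c <= '9'
def pvBDig (c : Char) : Bool := decide ('0' ≤ c ∧ c ≤ '9')

-- str.zfill(2) for a nonempty run of digits (no sign character present)
def pvZfill2 (s : List Char) : List Char := List.replicate (2 - s.length) '0' ++ s

-- the outer while-loop of B: consume a maximal digit run (inner while = takeWhile/dropWhile) or copy one char
def pvBScan : List Char → List Char
  | [] => []
  | c :: cs =>
      if pvBDig c then
        pvZfill2 (c :: cs.takeWhile pvBDig) ++ pvBScan (cs.dropWhile pvBDig)
      else c :: pvBScan cs
termination_by l => l.length
decreasing_by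
  · have := List.length_dropWhile_le pvBDig cs; simp; omega
  · simp

def modLabel_alt (label : String) : String := String.ofList (pvBScan label.toList)

-- ===== PRECONDITION & SPEC =====
def Spec_modLabel (label : String) (out : String) : Prop := out = modLabel_alt label
instance (label : String) (out : String) : Decidable (Spec_modLabel label out) := by unfold Spec_modLabel; infer_instance

-- ===== CLAIM (what is proved, stated in full; the proofs are below) =====
def Claim_equal_modLabel : Prop := ∀ (label : String), Dom_modLabel label → Spec_modLabel label (modLabel label)

-- ===== LEMMAS AND PROOFS =====

theorem pvDig_eq (c : Char) : pvIsnumber c = pvBDig c := by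
  have hL : "0123456789".toList = ['0','1','2','3','4','5','6','7','8','9'] := rfl
  rw [Bool.eq_iff_iff, pvIsnumber, pvBDig, decide_eq_true_iff, List.contains_iff_mem, hL]
  rw [show ∀ x : Char, x ∈ (['0','1','2','3','4','5','6','7','8','9'] : List Char) ↔ (x='0'∨x='1'∨x='2'∨x='3'∨x='4'∨x='5'∨x='6'∨x='7'∨x='8'∨x='9') from by intro x; simp]
  rw [show ('0' ≤ c ∧ c ≤ '9') ↔ ('0'.val ≤ c.val ∧ c.val ≤ '9'.val) from by rw [Char.le_def, Char.le_def]]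
  constructor
  · rintro (h|h|h|h|h|h|h|h|h|h) <;> subst h <;> decide
  · intro h
    have h1 := h.1; have h2 := h.2
    rw [UInt32.le_iff_toNat_le] at h1 h2
    rw [show ('0':Char).val.toNat = 48 from rfl] at h1
    rw [show ('9':Char).val.toNat = 57 from rfl] at h2
    have hv : c.val.toNat = 48 ∨ c.val.toNat = 49 ∨ c.val.toNat = 50 ∨ c.val.toNat = 51 ∨ c.val.toNat = 52 ∨ c.val.toNat = 53 ∨ c.val.toNat = 54 ∨ c.val.toNat = 55 ∨ c.val.toNat = 56 ∨ c.val.toNat = 57 := by omega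
    have key : ∀ k : Char, c.val.toNat = k.val.toNat → c = k := by
      intro k hk; exact Char.ext (UInt32.toNat_inj.mp hk)
    rcases hv with h|h|h|h|h|h|h|h|h|h
    · exact Or.inl (key '0' h)
    · exact Or.inr (Or.inl (key '1' h))
    · exact Or.inr (Or.inr (Or.inl (key '2' h)))
    · exact Or.inr (Or.inr (Or.inr (Or.inl (key '3' h))))
    · exact Or.inr (Or.inr (Or.inr (Or.inr (Or.inl (key '4' h)))))
    · exact Or.inr (Or.inr (Or.inr (Or.inr (Or.inr (Or.inl (key '5' h))))))
    · exact Or.inr (Or.inr (Or.inr (Or.inr (Or.inr (Or.inr (Or.inl (key '6' h)))))))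
    · exact Or.inr (Or.inr (Or.inr (Or.inr (Or.inr (Or.inr (Or.inr (Or.inl (key '7' h))))))))
    · exact Or.inr (Or.inr (Or.inr (Or.inr (Or.inr (Or.inr (Or.inr (Or.inr (Or.inl (key '8' h)))))))))
    · exact Or.inr (Or.inr (Or.inr (Or.inr (Or.inr (Or.inr (Or.inr (Or.inr (Or.inr (key '9' h)))))))))

theorem pvPad_eq (num : List Char) (h : num ≠ []) :
    (if num.length > 1 then num else '0' :: num) = pvZfill2 num := by
  rcases num with _ | ⟨a, _ | ⟨b, t⟩⟩ <;> simp_all [pvZfill2]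

theorem pvMain (rest : List Char) :
    (∀ acc num, num ≠ [] →
      pvALoop true acc num rest =
        acc ++ pvZfill2 (num ++ rest.takeWhile pvBDig) ++ pvBScan (rest.dropWhile pvBDig)) ∧
    (∀ acc, pvALoop false acc [] rest = acc ++ pvBScan rest) := by
  induction rest with
  | nil =>
      constructor
      · intro acc num h
        simp [pvALoop, pvBScan, ← pvPad_eq num h]
        rcases num with _ | ⟨a, _ | ⟨b, t⟩⟩ <;> simp_all
      · intro acc; simp [pvALoop, pvBScan]
  | cons c cs ih =>
      constructor
      · intro acc num h
        by_cases hd : pvBDig c = true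
        · rw [show pvALoop true acc num (c :: cs)
              = pvALoop true acc (num ++ [c]) cs by
              simp [pvALoop, pvDig_eq, hd]]
          rw [ih.1 acc (num ++ [c]) (by simp)]
          simp [hd]
        · rw [show pvALoop true acc num (c :: cs)
              = pvALoop false ((if num.length > 1 then acc ++ num else acc ++ '0' :: num) ++ [c]) [] cs by
              simp [pvALoop, pvDig_eq, hd]]
          rw [ih.2]
          have : (if num.length > 1 then acc ++ num else acc ++ '0' :: num)
              = acc ++ pvZfill2 num := by
            rw [← pvPad_eq num h]; split <;> simp
          rw [this]
          simp [List.takeWhile, List.dropWhile, hd, pvBScan]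
      · intro acc
        by_cases hd : pvBDig c = true
        · rw [show pvALoop false acc [] (c :: cs)
              = pvALoop true acc [c] cs by
              simp [pvALoop, pvDig_eq, hd]]
          rw [ih.1 acc [c] (by simp)]
          simp [pvBScan, hd]
        · rw [show pvALoop false acc [] (c :: cs)
              = pvALoop false (acc ++ [c]) [] cs by
              simp [pvALoop, pvDig_eq, hd]]
          rw [ih.2]
          simp [pvBScan, hd]

-- ===== VERDICT (by name: the statement is the Claim_ definition above) =====
theorem modLabel_spec : Claim_equal_modLabel := by
  intro label _
  unfold Spec_modLabel modLabel modLabel_alt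
  rw [(pvMain label.toList).2]
  simp
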